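-- pv_equiv track=rewrite | github.com/peterliu502/geo1000-assignment | lecture/assignment2/cab.py | wiggle
-- ===== SOURCE A (Python) =====
-- def wiggle(start, end, moves):
--     if moves == 0:
--         if start == end:
--             return 1
--         else:
--             return 0
--     else:
--         move_right = wiggle(start + 1, end, moves - 1)
--         move_left = wiggle(start - 1, end, moves - 1)
--         paths = move_right + move_left
--         return paths
-- ===== SOURCE B (Python) =====
-- def wiggle(start, end, moves):
--     d = abs(end - start)
--     if d > moves or (moves - d) % 2 != 0:
--         return 0
--     k = (moves - d) // 2
--     result = 1
--     for i in range(1, k + 1):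
--         result = result * (moves - i + 1) // i
--     return result
-- ===== Notes on version B (the rewrite author's own statement) =====
-- stated objective: faster
-- what changed: replaced the exponential two-branch recursion with a closed-form binomial coefficient C(moves,(moves-|end-start|)/2) after a range/parity check, computed by a single multiplicative loop
import Mathlib
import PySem

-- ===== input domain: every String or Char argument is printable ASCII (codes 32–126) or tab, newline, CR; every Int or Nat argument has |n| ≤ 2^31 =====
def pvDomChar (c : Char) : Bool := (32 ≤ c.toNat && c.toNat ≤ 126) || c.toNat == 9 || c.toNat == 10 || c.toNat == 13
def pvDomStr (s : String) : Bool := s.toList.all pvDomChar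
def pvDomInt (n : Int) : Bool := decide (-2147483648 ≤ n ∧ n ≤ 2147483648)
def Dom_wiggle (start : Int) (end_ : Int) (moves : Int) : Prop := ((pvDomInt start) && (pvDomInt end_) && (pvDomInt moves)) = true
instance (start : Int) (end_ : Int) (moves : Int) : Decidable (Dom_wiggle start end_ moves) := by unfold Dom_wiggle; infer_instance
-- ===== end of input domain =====

-- B replaces A's exponential two-branch recursion by the closed-form binomial count
-- C(moves, (moves-|end-start|)/2) (0 on a parity/range mismatch), computed by one short loop.
-- ===== PORT A =====
-- A recurses on moves; for moves < 0 the Python never terminates (RecursionError), so the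
-- recursion is expressed on the Nat depth moves.toNat, faithful exactly on Pre_ (0 ≤ moves).
def wiggleNat (start : Int) (end_ : Int) : Nat → Int
  | 0 => if start = end_ then 1 else 0
  | n + 1 =>
      let move_right := wiggleNat (start + 1) end_ n
      let move_left := wiggleNat (start - 1) end_ n
      let paths := move_right + move_left
      paths

def wiggle (start : Int) (end_ : Int) (moves : Int) : Int :=
  wiggleNat start end_ moves.toNat

-- ===== PORT B =====
def wiggle_alt (start : Int) (end_ : Int) (moves : Int) : Int :=
  let d : Int := |end_ - start|
  if d > moves ∨ PySem.Int.mod (moves - d) 2 ≠ 0 then 0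
  else
    let k := PySem.Int.floordiv (moves - d) 2
    (PySem.List.pyRange 1 (k + 1) 1).foldl
      (fun result i => PySem.Int.floordiv (result * (moves - i + 1)) i) 1

-- ===== PRECONDITION & SPEC =====
-- Pre_ excludes moves < 0, on which the Python A exceeds the recursion limit (RecursionError).
def Pre_wiggle (start : Int) (end_ : Int) (moves : Int) : Prop := 0 ≤ moves
instance (start : Int) (end_ : Int) (moves : Int) : Decidable (Pre_wiggle start end_ moves) := by
  unfold Pre_wiggle; infer_instance
def pvWitness_wiggle : Int × Int × Int := (0, 2, 4)

def Spec_wiggle (start : Int) (end_ : Int) (moves : Int) (out : Int) : Prop :=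
  out = wiggle_alt start end_ moves
instance (start : Int) (end_ : Int) (moves : Int) (out : Int) : Decidable (Spec_wiggle start end_ moves out) := by
  unfold Spec_wiggle; infer_instance

-- ===== CLAIM (what is proved, stated in full; the proofs are below) =====
def Claim_equal_wiggle : Prop := ∀ (start : Int) (end_ : Int) (moves : Int), Dom_wiggle start end_ moves → Pre_wiggle start end_ moves → Spec_wiggle start end_ moves (wiggle start end_ moves)

-- ===== LEMMAS AND PROOFS =====

-- A's count depends only on the displacement end_ - start.
def wigD : Nat → Int → Int
  | 0, d => if d = 0 then 1 else 0
  | n + 1, d => wigD n (d - 1) + wigD n (d + 1)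

theorem wiggleNat_eq_wigD (n : Nat) : ∀ (start end_ : Int),
    wiggleNat start end_ n = wigD n (end_ - start) := by
  induction n with
  | zero => intro s e; simp [wiggleNat, wigD, eq_comm, sub_eq_zero]
  | succ n ih =>
      intro s e
      simp only [wiggleNat, wigD, ih]
      ring_nf

-- the closed form on Nat data: walks of n ±1-steps with net displacement of absolute value a
def clN (n a : Nat) : Int :=
  if a ≤ n ∧ (n - a) % 2 = 0 then (n.choose ((n - a) / 2) : Int) else 0

theorem clN_step_pos (n a : Nat) (ha : 1 ≤ a) :
    clN n (a - 1) + clN n (a + 1) = clN (n + 1) a := by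
  by_cases hT : a ≤ n + 1 ∧ (n + 1 - a) % 2 = 0
  · by_cases hE : a = n + 1
    · subst hE
      have h1 : n + 1 - 1 = n := by omega
      simp only [clN, h1]
      rw [if_pos ⟨le_refl n, by omega⟩, if_neg (by omega), if_pos ⟨by omega, by omega⟩]
      simp
    · obtain ⟨K, hK, hK1⟩ : ∃ K, n + 1 - a = 2 * K ∧ 1 ≤ K := ⟨(n + 1 - a) / 2, by omega⟩
      have idx1 : (n - (a - 1)) / 2 = K := by omega
      have idx2 : (n - (a + 1)) / 2 = K - 1 := by omega
      have idxT : (n + 1 - a) / 2 = K := by omega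
      simp only [clN]
      rw [if_pos ⟨by omega, by omega⟩, if_pos ⟨by omega, by omega⟩, if_pos ⟨by omega, by omega⟩,
        idx1, idx2, idxT]
      have hKs : K = (K - 1) + 1 := by omega
      rw [hKs, Nat.choose_succ_succ n (K - 1)]
      push_cast
      ring
  · simp only [clN]
    rw [if_neg (by omega), if_neg (by omega), if_neg (by omega)]
    simp

theorem clN_step_zero (n : Nat) : clN n 1 + clN n 1 = clN (n + 1) 0 := by
  by_cases hn : n % 2 = 1
  · obtain ⟨t, ht⟩ : ∃ t, n = 2 * t + 1 := ⟨n / 2, by omega⟩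
    simp only [clN]
    rw [if_pos ⟨by omega, by omega⟩, if_pos ⟨by omega, by omega⟩]
    have idx1 : (n - 1) / 2 = t := by omega
    have idxT : (n + 1 - 0) / 2 = t + 1 := by omega
    rw [idx1, idxT, Nat.choose_succ_succ n t]
    have hsym : n.choose (t + 1) = n.choose t := by
      have := Nat.choose_symm (show t + 1 ≤ n by omega)
      rw [show n - (t + 1) = t by omega] at this
      exact this.symm
    rw [hsym]
    push_cast
    ring
  · simp only [clN]
    rw [if_neg (by omega), if_neg (by omega)]
    simp

theorem wigD_eq_clN (n : Nat) : ∀ (d : Int), wigD n d = clN n d.natAbs := by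
  induction n with
  | zero =>
      intro d
      by_cases h : d = 0 <;> simp [wigD, clN, h]
  | succ n ih =>
      intro d
      simp only [wigD, ih]
      rcases lt_trichotomy d 0 with hd | hd | hd
      · have h1 : (d - 1).natAbs = d.natAbs + 1 := by omega
        have h2 : (d + 1).natAbs = d.natAbs - 1 := by omega
        rw [h1, h2, Int.add_comm]
        rcases Nat.eq_or_lt_of_le (Nat.one_le_iff_ne_zero.mpr (by omega) : 1 ≤ d.natAbs) with h | h
        · exact clN_step_pos n d.natAbs (by omega)
        · exact clN_step_pos n d.natAbs (by omega)
      · subst hd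
        simpa using clN_step_zero n
      · have h1 : (d - 1).natAbs = d.natAbs - 1 := by omega
        have h2 : (d + 1).natAbs = d.natAbs + 1 := by omega
        rw [h1, h2]
        exact clN_step_pos n d.natAbs (by omega)

-- the multiplicative loop computes the binomial coefficient
theorem loop_choose (m : Int) (hm : 0 ≤ m) (j : Nat) (hj : (j : Int) ≤ m) :
    (PySem.List.pyRange 1 ((j : Int) + 1) 1).foldl
      (fun result i => PySem.Int.floordiv (result * (m - i + 1)) i) 1
    = (m.toNat.choose j : Int) := by
  induction j with
  | zero => simp [PySem.List.pyRange_one_eq_nil (by omega : (1:Int) ≤ 1)]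
  | succ j ih =>
      have hsplit := PySem.List.pyRange_one_succ_right (a := 1) (b := (j : Int) + 1) (by omega)
      push_cast
      push_cast at hsplit ih
      rw [hsplit, List.foldl_append, ih (by omega)]
      simp only [List.foldl_cons, List.foldl_nil]
      have hid : (m.toNat.choose j : Int) * (m - ((j : Int) + 1) + 1)
          = (m.toNat.choose (j + 1) : Int) * ((j : Int) + 1) := by
        have h := Nat.choose_succ_right_eq m.toNat j
        have hc : ((m.toNat - j : Nat) : Int) = m - j := by omega
        calc (m.toNat.choose j : Int) * (m - ((j : Int) + 1) + 1)
            = (m.toNat.choose j : Int) * ((m.toNat - j : Nat) : Int) := by rw [hc]; ring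
          _ = ((m.toNat.choose j * (m.toNat - j) : Nat) : Int) := by push_cast; ring
          _ = ((m.toNat.choose (j + 1) * (j + 1) : Nat) : Int) := by rw [← h]
          _ = (m.toNat.choose (j + 1) : Int) * ((j : Int) + 1) := by push_cast; ring
      rw [PySem.Int.floordiv_eq_ediv_of_pos (by omega), hid]
      exact Int.mul_ediv_cancel _ (by omega)

theorem wiggle_alt_eq_clN (start end_ moves : Int) (hm : 0 ≤ moves) :
    wiggle_alt start end_ moves = clN moves.toNat (end_ - start).natAbs := by
  have habs : |end_ - start| = ((end_ - start).natAbs : Int) := by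
    exact_mod_cast (Int.abs_eq_natAbs _)
  set a := (end_ - start).natAbs with ha
  set n := moves.toNat with hn
  have hmn : moves = (n : Int) := by omega
  by_cases hC : a ≤ n ∧ (n - a) % 2 = 0
  · have hcond : ¬ (|end_ - start| > moves ∨ PySem.Int.mod (moves - |end_ - start|) 2 ≠ 0) := by
      rw [habs, PySem.Int.mod_eq_emod_of_pos (by omega)]
      push Not
      constructor
      · omega
      · omega
    rw [wiggle_alt]
    simp only []
    rw [if_neg hcond]
    have hk : PySem.Int.floordiv (moves - |end_ - start|) 2 = (((n - a) / 2 : Nat) : Int) := by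
      rw [habs, PySem.Int.floordiv_eq_ediv_of_pos (by omega)]
      omega
    rw [hk, loop_choose moves hm ((n - a) / 2) (by omega)]
    rw [clN, if_pos hC, ← hn]
  · have hcond : (|end_ - start| > moves ∨ PySem.Int.mod (moves - |end_ - start|) 2 ≠ 0) := by
      rw [habs, PySem.Int.mod_eq_emod_of_pos (by omega)]
      omega
    rw [wiggle_alt, if_pos hcond, clN, if_neg hC]

-- ===== VERDICT (by name: the statement is the Claim_ definition above) =====
theorem wiggle_spec : Claim_equal_wiggle := by
  intro s e m _ hpre
  show wiggle s e m = wiggle_alt s e m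
  rw [wiggle, wiggleNat_eq_wigD, wigD_eq_clN, wiggle_alt_eq_clN s e m hpre]
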